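-- pv_equiv track=rewrite | github.com/dmsavvin/hrank | hrank/stock_maximize/stock_maximize.py | stockmax
-- ===== SOURCE A (Python) =====
-- def stockmax(prices):
--     profit = 0
--     n = len(prices)
--     maxs = [0]
--     for p in prices[::-1]:
--         maxs = [max(p, maxs[0])] + maxs
--     for i in range(n - 1, -1, -1):
--         profit += max(maxs[i] - prices[i], 0)
--     return profit
-- ===== SOURCE B (Python) =====
-- def stockmax(prices):
--     best = 0
--     profit = 0
--     for p in reversed(prices):
--         if p > best:
--             best = p
--         profit += best - p
--     return profit
-- ===== Notes on version B (the rewrite author's own statement) =====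
-- stated objective: faster
-- what changed: Replaces the O(n^2) construction of the suffix-max list by repeated list prepending plus an indexed second loop with a single reverse pass that keeps a running maximum and accumulates profit directly.
import Mathlib
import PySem

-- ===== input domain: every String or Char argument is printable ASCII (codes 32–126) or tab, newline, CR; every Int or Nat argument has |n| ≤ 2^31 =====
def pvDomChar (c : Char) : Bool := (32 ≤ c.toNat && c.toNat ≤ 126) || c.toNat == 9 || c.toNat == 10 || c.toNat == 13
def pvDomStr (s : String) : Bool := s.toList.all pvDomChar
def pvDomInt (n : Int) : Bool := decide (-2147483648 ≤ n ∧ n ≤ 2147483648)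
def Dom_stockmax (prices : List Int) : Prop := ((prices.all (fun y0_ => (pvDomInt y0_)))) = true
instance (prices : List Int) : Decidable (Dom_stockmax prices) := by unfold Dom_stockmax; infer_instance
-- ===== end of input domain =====

-- B replaces A's quadratic suffix-max list building (repeated prepend) and indexed second
-- loop with a single O(n) reverse pass keeping a running maximum; measured asymptotically faster.


-- ===== PORT A =====
-- slice? with step -1 is never none; .getD [] is exact here (prices[::-1] never raises).
def stockmax (prices : List Int) : Int :=
  let profit : Int := 0
  let n : Int := (prices.length : Int)
  let maxs : List Int := [0]
  let maxs : List Int :=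
    ((PySem.List.slice? prices none none (-1)).getD []).foldl
      (fun maxs p => (max p (PySem.List.pyGetD maxs 0 0)) :: maxs) maxs
  (PySem.List.pyRange (n - 1) (-1) (-1)).foldl
    (fun profit i =>
      profit + max (PySem.List.pyGetD maxs i 0 - PySem.List.pyGetD prices i 0) 0)
    profit

-- ===== PORT B =====
def stockmax_alt (prices : List Int) : Int :=
  (prices.reverse.foldl
    (fun (s : Int × Int) p =>
      let best := if p > s.1 then p else s.1
      (best, s.2 + (best - p)))
    (0, 0)).2

-- ===== PRECONDITION & SPEC =====
def Spec_stockmax (prices : List Int) (out : Int) : Prop := out = stockmax_alt prices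
instance (prices : List Int) (out : Int) : Decidable (Spec_stockmax prices out) := by unfold Spec_stockmax; infer_instance

-- ===== CLAIM (what is proved, stated in full; the proofs are below) =====
def Claim_equal_stockmax : Prop := ∀ (prices : List Int), Dom_stockmax prices → Spec_stockmax prices (stockmax prices)

-- ===== LEMMAS AND PROOFS =====

-- B's state as a foldr: (running max of the suffix with 0, profit of the suffix)
def pvG (l : List Int) : Int × Int :=
  l.foldr (fun p s => let best := if p > s.1 then p else s.1; (best, s.2 + (best - p))) (0, 0)

-- A's maxs list as a foldr
def pvM (l : List Int) : List Int :=
  l.foldr (fun p acc => (max p (PySem.List.pyGetD acc 0 0)) :: acc) [0]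

theorem pvG_fst (l : List Int) : 0 ≤ (pvG l).1 := by
  induction l with
  | nil => simp [pvG]
  | cons p t ih =>
    have h : pvG (p :: t)
        = (if p > (pvG t).1 then p else (pvG t).1,
           (pvG t).2 + ((if p > (pvG t).1 then p else (pvG t).1) - p)) := rfl
    rw [h]
    dsimp only
    split_ifs with hc <;> omega

theorem pvM_head (l : List Int) : (pvM l).getD 0 0 = (pvG l).1 := by
  have hrec : ∀ (p : Int) (t : List Int), pvG (p :: t)
      = (if p > (pvG t).1 then p else (pvG t).1,
         (pvG t).2 + ((if p > (pvG t).1 then p else (pvG t).1) - p)) := fun _ _ => rfl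
  induction l with
  | nil => simp [pvM, pvG]
  | cons p t ih =>
    have hm : pvM (p :: t) = max p (PySem.List.pyGetD (pvM t) 0 0) :: pvM t := rfl
    rw [hrec, hm, List.getD_cons_zero, PySem.List.pyGetD_zero, ih]
    dsimp only
    rw [max_def]
    split_ifs <;> omega

theorem pv_sum_eq (l : List Int) :
    ((List.range l.length).map
      (fun k => max ((pvM l).getD k 0 - l.getD k 0) 0)).sum = (pvG l).2 := by
  induction l with
  | nil => simp [pvG]
  | cons p t ih =>
    have hlen : (p :: t).length = t.length + 1 := rfl
    rw [hlen, List.range_succ_eq_map]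
    simp only [List.map_cons, List.map_map, List.sum_cons]
    have hshift :
        ((List.range t.length).map
          ((fun k => max ((pvM (p :: t)).getD k 0 - (p :: t).getD k 0) 0) ∘ (· + 1))).sum
        = (pvG t).2 := by
      rw [← ih]
      apply congrArg List.sum
      apply List.map_congr_left
      intro k _
      have hm : pvM (p :: t) = max p (PySem.List.pyGetD (pvM t) 0 0) :: pvM t := rfl
      simp [hm]
    rw [hshift]
    have h0 : (pvM (p :: t)).getD 0 0 = max p ((pvG t).1) := by
      simp only [pvM, List.foldr_cons, List.getD_cons_zero]
      have := pvM_head t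
      simp only [pvM] at this
      rw [PySem.List.pyGetD_zero, this]
    simp only [List.getD_cons_zero, h0]
    have hb := pvG_fst t
    have hrec : pvG (p :: t)
        = (if p > (pvG t).1 then p else (pvG t).1,
           (pvG t).2 + ((if p > (pvG t).1 then p else (pvG t).1) - p)) := rfl
    show max (max p (pvG t).1 - p) 0 + (pvG t).2 = (pvG (p :: t)).2
    rw [hrec]
    dsimp only
    rw [max_def, max_def]
    split_ifs <;> omega

theorem stockmax_alt_eq_pvG (prices : List Int) : stockmax_alt prices = (pvG prices).2 := by
  unfold stockmax_alt pvG
  rw [List.foldl_reverse]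

theorem stockmax_eq (prices : List Int) : stockmax prices = (pvG prices).2 := by
  unfold stockmax
  rw [PySem.List.slice?_none_none_neg_one]
  simp only [Option.getD_some]
  rw [List.foldl_reverse]
  have hmaxs : prices.foldr
      (fun p maxs => (max p (PySem.List.pyGetD maxs 0 0)) :: maxs) [0] = pvM prices := by
    rfl
  rw [hmaxs]
  have hrev : PySem.List.pyRange ((prices.length : Int) - 1) (-1) (-1)
      = (PySem.List.pyRange 0 (prices.length : Int) 1).reverse := by
    have := PySem.List.pyRange_neg_one_eq_reverse ((prices.length : Int) - 1) (-1)
    simpa using this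
  rw [hrev, List.foldl_reverse]
  have hfoldr : ∀ (xs : List Int) (init : Int),
      xs.foldr (fun i profit =>
        profit + max (PySem.List.pyGetD (pvM prices) i 0 - PySem.List.pyGetD prices i 0) 0) init
      = init + (xs.map (fun i =>
          max (PySem.List.pyGetD (pvM prices) i 0 - PySem.List.pyGetD prices i 0) 0)).sum := by
    intro xs init
    induction xs with
    | nil => simp
    | cons x t ih => simp [ih]; ring
  rw [hfoldr]
  rw [PySem.List.pyRange_one]
  simp only [List.map_map, zero_add, sub_zero, Int.toNat_natCast]
  rw [← pv_sum_eq prices]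
  congr 1
  apply List.map_congr_left
  intro k _
  simp [PySem.List.pyGetD_natCast]

-- ===== VERDICT (by name: the statement is the Claim_ definition above) =====
theorem stockmax_spec : Claim_equal_stockmax := by
  intro prices _
  unfold Spec_stockmax
  rw [stockmax_alt_eq_pvG, stockmax_eq]
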